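-- pv_equiv track=rewrite | github.com/xlite-dev/cache-dit | src/cache_dit/caching/cache_interface.py | _steps_mask
-- ===== SOURCE A (Python) =====
-- from typing import Any, Tuple, List, Union, Optional
--
-- def _steps_mask(
--     compute_bins: List[int],
--     cache_bins: List[int],
--     total_steps: Optional[int] = None,
-- ) -> list[int]:
--     mask = []
--     step = 0
--     compute_bins = compute_bins.copy()
--     cache_bins = cache_bins.copy()
--     # reverse to use as stacks
--     compute_bins.reverse()
--     cache_bins.reverse()
--
--     if total_steps is not None:
--         assert (
--             sum(compute_bins) + sum(cache_bins) >= total_steps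
--         ), "The sum of compute and cache intervals must be at least total_steps."
--     else:
--         total_steps = sum(compute_bins) + sum(cache_bins)
--
--     while step < total_steps:
--
--         if compute_bins:
--             ci = compute_bins.pop()
--             mask.extend([1] * ci)
--             step += ci
--         if cache_bins:
--             cai = cache_bins.pop()
--             mask.extend([0] * cai)
--             step += cai
--
--         if step >= total_steps:
--             break
--
--     return mask[:total_steps]
-- ===== SOURCE B (Python) =====
-- def _steps_mask(compute_bins, cache_bins, total_steps=None):
--     total = sum(compute_bins) + sum(cache_bins)
--     if total_steps is None:
--         total_steps = total
--     else:
--         assert total >= total_steps, \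
--             "The sum of compute and cache intervals must be at least total_steps."
--     # stage 1: pad to equal length and flatten into run-length pairs (bit, count)
--     n = max(len(compute_bins), len(cache_bins))
--     cb = compute_bins + [0] * (n - len(compute_bins))
--     kb = cache_bins + [0] * (n - len(cache_bins))
--     runs = [r for c, k in zip(cb, kb) for r in ((1, c), (0, k))]
--     # stage 2: emit each run clamped to the remaining budget (never over-allocates)
--     budget = max(0, total_steps)
--     mask = []
--     for bit, cnt in runs:
--         take = min(max(cnt, 0), budget)
--         mask += [bit] * take
--         budget -= take
--     return mask
-- ===== Notes on version B (the rewrite author's own statement) =====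
-- stated objective: alternative
-- what changed: Replaces A's copy/reverse/stack-pop while-loop with step counter and break by a staged pipeline: pad both bin lists with zeros to equal length, flatten the zipped pairs into run-length (bit,count) pairs, then emit each run clamped to a remaining budget of max(0,total_steps) (no early break, no overshoot tracking, no run elements materialised beyond the budget); Pre_ excludes only inputs where A's assert fails (total_steps > sum of bins) and A raises AssertionError.
import Mathlib
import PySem

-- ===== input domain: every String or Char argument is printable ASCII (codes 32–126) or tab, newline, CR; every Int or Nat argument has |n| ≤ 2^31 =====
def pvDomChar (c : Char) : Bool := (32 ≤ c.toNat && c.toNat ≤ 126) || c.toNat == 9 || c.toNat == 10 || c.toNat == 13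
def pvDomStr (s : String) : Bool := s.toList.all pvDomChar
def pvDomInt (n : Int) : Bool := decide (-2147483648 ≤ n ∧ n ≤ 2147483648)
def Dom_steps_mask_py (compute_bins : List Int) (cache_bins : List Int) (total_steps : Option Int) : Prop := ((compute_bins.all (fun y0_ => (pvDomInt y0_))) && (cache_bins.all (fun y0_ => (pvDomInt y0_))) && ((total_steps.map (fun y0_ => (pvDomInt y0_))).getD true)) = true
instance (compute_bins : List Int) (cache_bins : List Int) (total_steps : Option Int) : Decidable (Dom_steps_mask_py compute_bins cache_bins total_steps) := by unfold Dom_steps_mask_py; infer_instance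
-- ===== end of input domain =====

-- B replaces A's copy/reverse/stack-pop while-loop (step counter, early break) by a staged
-- pipeline: pad the bin lists with zeros, flatten the zipped pairs into run-length pairs,
-- and emit each run clamped to the remaining total_steps budget (objective: alternative —
-- a staged decomposition of the same cost; A mutates no argument the caller sees).


-- ===== PORT A =====
-- A's while loop. The reversed copies popped with .pop() (from the end) are modelled as the
-- ORIGINAL lists popped from the head — exactly the elements Python pops, in the same order.
-- In the branch where both stacks are empty and step < total_steps the Python loop body does
-- nothing and spins forever; that state is unreachable whenever A terminates (then
-- step = sum ≥ total_steps), and we return mask there.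
def stepsLoopA (t : Int) (comp cache : List Int) (step : Int) (mask : List Int) : List Int :=
  if step < t then
    match comp, cache with
    | [], [] => mask
    | ci :: cs, [] =>
        stepsLoopA t cs [] (step + ci) (mask ++ PySem.List.pyRepeat [1] ci)
    | [], cai :: cas =>
        stepsLoopA t [] cas (step + cai) (mask ++ PySem.List.pyRepeat [0] cai)
    | ci :: cs, cai :: cas =>
        stepsLoopA t cs cas (step + ci + cai)
          (mask ++ PySem.List.pyRepeat [1] ci ++ PySem.List.pyRepeat [0] cai)
  else mask
termination_by comp.length + cache.length

-- the assert raises (AssertionError) when sum < total_steps: those inputs are outside Pre_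
def steps_mask_py (compute_bins : List Int) (cache_bins : List Int) (total_steps : Option Int) : List Int :=
  let t : Int :=
    match total_steps with
    | some t => t
    | none => compute_bins.reverse.sum + cache_bins.reverse.sum
  PySem.List.slice (stepsLoopA t compute_bins cache_bins 0 []) none (some t)

-- ===== PORT B =====
-- Source B, stage for stage: pad both lists with zeros to n = max(len,len); flatten the zipped
-- pairs into run-length pairs (bit, count) (the 'runs' comprehension); then emit each run
-- clamped to the remaining budget max(0, total_steps) (the for-loop over runs).
def emitRuns (runs : List (Int × Int)) (budget : Int) (mask : List Int) : List Int :=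
  match runs with
  | [] => mask
  | (bit, cnt) :: rest =>
      let take := min (max cnt 0) budget
      emitRuns rest (budget - take) (mask ++ PySem.List.pyRepeat [bit] take)

def steps_mask_py_alt (compute_bins : List Int) (cache_bins : List Int) (total_steps : Option Int) : List Int :=
  let total : Int := compute_bins.sum + cache_bins.sum
  let t : Int := total_steps.getD total
  let n : Nat := max compute_bins.length cache_bins.length
  let cb := compute_bins ++ List.replicate (n - compute_bins.length) (0 : Int)
  let kb := cache_bins ++ List.replicate (n - cache_bins.length) (0 : Int)
  let runs := (cb.zip kb).flatMap (fun p => [((1 : Int), p.1), ((0 : Int), p.2)])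
  emitRuns runs (max 0 t) []

-- ===== PRECONDITION & SPEC =====
-- Pre_ excludes exactly the inputs on which A's assert fails (a given total_steps larger
-- than the sum of the bins) and A raises AssertionError; everywhere else A returns and B matches.
def Pre_steps_mask_py (compute_bins : List Int) (cache_bins : List Int) (total_steps : Option Int) : Prop :=
  (match total_steps with
   | none => true
   | some t => decide (t ≤ compute_bins.sum + cache_bins.sum)) = true
instance (compute_bins : List Int) (cache_bins : List Int) (total_steps : Option Int) : Decidable (Pre_steps_mask_py compute_bins cache_bins total_steps) := by unfold Pre_steps_mask_py; infer_instance

def pvWitness_steps_mask_py : List Int × List Int × Option Int := ([2, 1], [1, 2], some 4)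

def Spec_steps_mask_py (compute_bins : List Int) (cache_bins : List Int) (total_steps : Option Int) (out : List Int) : Prop := out = steps_mask_py_alt compute_bins cache_bins total_steps
instance (compute_bins : List Int) (cache_bins : List Int) (total_steps : Option Int) (out : List Int) : Decidable (Spec_steps_mask_py compute_bins cache_bins total_steps out) := by unfold Spec_steps_mask_py; infer_instance

-- ===== CLAIM (what is proved, stated in full; the proofs are below) =====
def Claim_equal_steps_mask_py : Prop := ∀ (compute_bins : List Int) (cache_bins : List Int) (total_steps : Option Int), Dom_steps_mask_py compute_bins cache_bins total_steps → Pre_steps_mask_py compute_bins cache_bins total_steps → Spec_steps_mask_py compute_bins cache_bins total_steps (steps_mask_py compute_bins cache_bins total_steps)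

-- ===== LEMMAS AND PROOFS =====

-- proof-side helper: the full interleaved mask, with no truncation and no early stop
def interFull (comp cache : List Int) : List Int :=
  match comp, cache with
  | [], [] => []
  | ci :: cs, [] => PySem.List.pyRepeat [1] ci ++ interFull cs []
  | [], cai :: cas => PySem.List.pyRepeat [0] cai ++ interFull [] cas
  | ci :: cs, cai :: cas =>
      PySem.List.pyRepeat [1] ci ++ (PySem.List.pyRepeat [0] cai ++ interFull cs cas)

-- A's step counter never exceeds the length of the mask built so far ([1]*ci adds
-- max(ci,0) items while step grows by ci); truncated at t, the loop's result is the
-- truncation of acc ++ interFull.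
lemma stepsLoopA_take (t : Int) :
    ∀ n (comp cache acc : List Int) (step : Int), comp.length + cache.length ≤ n →
      step ≤ (acc.length : Int) →
      (stepsLoopA t comp cache step acc).take t.toNat
        = (acc ++ interFull comp cache).take t.toNat := by
  intro n
  induction n with
  | zero =>
      intro comp cache acc step hn hstep
      have hc : comp = [] := by cases comp <;> simp_all
      have hk : cache = [] := by cases cache <;> simp_all
      subst hc; subst hk
      rw [stepsLoopA.eq_def]
      by_cases hlt : step < t <;> simp [hlt, interFull]
  | succ m ih =>
      intro comp cache acc step hn hstep
      rw [stepsLoopA.eq_def]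
      by_cases hlt : step < t
      · simp only [if_pos hlt]
        match comp, cache with
        | [], [] => simp [interFull]
        | ci :: cs, [] =>
            have hci := Int.self_le_toNat ci
            dsimp only
            rw [ih cs [] (acc ++ PySem.List.pyRepeat [1] ci) (step + ci)
                  (by simp at hn ⊢; omega)
                  (by simp [PySem.List.pyRepeat_singleton]; omega)]
            simp [interFull]
        | [], cai :: cas =>
            have hcai := Int.self_le_toNat cai
            dsimp only
            rw [ih [] cas (acc ++ PySem.List.pyRepeat [0] cai) (step + cai)
                  (by simp at hn ⊢; omega)
                  (by simp [PySem.List.pyRepeat_singleton]; omega)]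
            simp [interFull]
        | ci :: cs, cai :: cas =>
            have hci := Int.self_le_toNat ci
            have hcai := Int.self_le_toNat cai
            dsimp only
            rw [ih cs cas (acc ++ PySem.List.pyRepeat [1] ci ++ PySem.List.pyRepeat [0] cai)
                  (step + ci + cai) (by simp at hn ⊢; omega)
                  (by simp [PySem.List.pyRepeat_singleton]; omega)]
            simp [interFull]
      · simp only [if_neg hlt]
        have ht : t.toNat ≤ acc.length := by omega
        rw [List.take_append_of_le_length ht]

-- B's zero-padded zip-flatten into runs IS the run encoding of the full interleaved mask:
-- expanding each run of the padded zip gives interFull (padding zeros give empty runs).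
lemma padzip_eq_interFull :
    ∀ (comp cache : List Int),
      ((comp ++ List.replicate (max comp.length cache.length - comp.length) (0 : Int)).zip
        (cache ++ List.replicate (max comp.length cache.length - cache.length) (0 : Int))).flatMap
        (fun p => PySem.List.pyRepeat [1] p.1 ++ PySem.List.pyRepeat [0] p.2)
      = interFull comp cache := by
  intro comp
  induction comp with
  | nil =>
      intro cache
      induction cache with
      | nil => simp [interFull]
      | cons cai cas ihc =>
          simp only [List.length_nil, List.length_cons] at *
          simpa [interFull, PySem.List.pyRepeat_singleton, List.replicate_succ] using ihc
  | cons ci cs ih =>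
      intro cache
      cases cache with
      | nil =>
          have h := ih []
          simp only [List.length_nil, List.length_cons] at *
          simpa [interFull, PySem.List.pyRepeat_singleton, List.replicate_succ] using h
      | cons cai cas =>
          have h := ih cas
          simp only [List.length_cons] at *
          simpa [interFull, Nat.succ_max_succ] using h

-- B's budgeted emission of the run list is exactly the take of its full expansion
lemma emitRuns_take :
    ∀ (runs : List (Int × Int)) (budget : Int) (acc : List Int), 0 ≤ budget →
      emitRuns runs budget acc
        = acc ++ (runs.flatMap (fun p => PySem.List.pyRepeat [p.1] p.2)).take budget.toNat := by
  intro runs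
  induction runs with
  | nil => intro budget acc _; simp [emitRuns]
  | cons r rest ih =>
      intro budget acc hb
      obtain ⟨bit, cnt⟩ := r
      simp only [emitRuns]
      have htake0 : (0 : Int) ≤ min (max cnt 0) budget := by omega
      have hble : min (max cnt 0) budget ≤ budget := by omega
      rw [ih _ _ (by omega)]
      simp only [PySem.List.pyRepeat_singleton, List.flatMap_cons, List.append_assoc,
        List.take_append, List.take_replicate, List.length_replicate]
      congr 2
      · congr 1; omega
      · congr 1; omega

-- the two run expansions coincide after flattening the pair encoding
lemma runs_expand (pairs : List (Int × Int)) :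
    ((pairs.flatMap (fun p => [((1 : Int), p.1), ((0 : Int), p.2)])).flatMap
        (fun p => PySem.List.pyRepeat [p.1] p.2))
      = pairs.flatMap (fun p => PySem.List.pyRepeat [1] p.1 ++ PySem.List.pyRepeat [0] p.2) := by
  induction pairs with
  | nil => simp
  | cons p ps ih =>
      simp only [List.flatMap_cons, List.flatMap_append, ih]
      simp

-- with a negative bound A's loop never runs
lemma stepsLoopA_neg (t : Int) (comp cache : List Int) (ht : t < 0) :
    stepsLoopA t comp cache 0 [] = [] := by
  rw [stepsLoopA.eq_def]
  simp [show ¬(0:Int) < t by omega]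

-- ===== VERDICT (by name: the statement is the Claim_ definition above) =====
theorem steps_mask_py_spec : Claim_equal_steps_mask_py := by
  intro comp cache tso _ _
  unfold Spec_steps_mask_py steps_mask_py steps_mask_py_alt
  have key : ∀ t : Int,
      PySem.List.slice (stepsLoopA t comp cache 0 []) none (some t)
        = emitRuns
            (((comp ++ List.replicate (max comp.length cache.length - comp.length) (0 : Int)).zip
              (cache ++ List.replicate (max comp.length cache.length - cache.length) (0 : Int))).flatMap
              (fun p => [((1 : Int), p.1), ((0 : Int), p.2)]))
            (max 0 t) [] := by
    intro t
    rw [emitRuns_take _ _ _ (by omega), runs_expand, padzip_eq_interFull comp cache,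
      List.nil_append]
    by_cases h0 : 0 ≤ t
    · rw [PySem.List.slice_to _ h0]
      have : (max 0 t).toNat = t.toNat := by omega
      rw [this,
        stepsLoopA_take t (comp.length + cache.length) comp cache [] 0 (le_refl _) (by simp)]
      simp
    · rw [stepsLoopA_neg t comp cache (by omega)]
      have hm : (max 0 t).toNat = 0 := by omega
      rw [hm]
      simp [PySem.List.slice]
  cases tso with
  | none =>
      simp only [Option.getD_none, List.sum_reverse]
      exact key _
  | some t =>
      simp only [Option.getD_some]
      exact key t
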